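-- pv_equiv track=rewrite | github.com/metamendmarketing/monthly-seo-report-builder | monthly_report_builder_app.py | _detect_gsc_table_kind
-- ===== SOURCE A (Python) =====
-- from typing import Dict, Optional, List, Tuple, Any
--
-- def _detect_gsc_table_kind(sheet: str, headers: List[str]) -> str:
--     """Classify GSC export tables by sheet name / headers.
--
--     Important: sheet is often plural ('Queries'), so check both singular/plural tokens.
--     """
--     s = (sheet or "").strip().lower()
--     # Primary: sheet name
--     if "query" in s or "queries" in s:
--         return "queries"
--     if "page" in s or "pages" in s:
--         return "pages"
--     if "country" in s or "countries" in s: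
--         return "countries"
--     if "device" in s or "devices" in s:
--         return "devices"
--     if "search appearance" in s or "appearance" in s:
--         return "search_appearance"
--     if "date" in s or "chart" in s or "performance" in s:
--         return "chart"
--
--     # Fallback: infer by header labels (common: 'Top queries', 'Top pages')
--     hs = [str(h or "").strip().lower() for h in (headers or [])]
--     if any("query" in h or "queries" in h for h in hs):
--         return "queries"
--     if any("page" in h or "pages" in h or "url" == h for h in hs):
--         return "pages"
--     if any("country" in h or "countries" in h for h in hs):
--         return "countries"
--     if any("device" in h or "devices" in h for h in hs):
--         return "devices"
--     if any("appearance" in h for h in hs):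
--         return "search_appearance"
--
--     return "unknown"
-- ===== SOURCE B (Python) =====
-- from typing import List
--
-- # Single-pass hit-set classifier.  Instead of A's ordered if-chains (which scan
-- # the header list once per category), compute in ONE pass the set of category
-- # labels hit by the text, then pick the highest-priority hit.  Token groups are
-- # minimised: 'pages' ⊃ 'page', 'devices' ⊃ 'device', 'search appearance' ⊃
-- # 'appearance', so one token suffices there.
-- _RULES = (
--     ("queries", ("query", "queries")),
--     ("pages", ("page",)),
--     ("countries", ("country", "countries")),
--     ("devices", ("device",)),
--     ("search_appearance", ("appearance",)),
-- )
--
-- def _hits(text: str) -> set: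
--     return {lab for lab, toks in _RULES if any(t in text for t in toks)}
--
-- def _detect_gsc_table_kind(sheet: str, headers: List[str]) -> str:
--     s = (sheet or "").strip().lower()
--     hits = _hits(s)
--     if not hits:
--         if "date" in s or "chart" in s or "performance" in s:
--             return "chart"
--         for h in (headers or []):
--             h = str(h or "").strip().lower()
--             hits |= _hits(h)
--             if h == "url":
--                 hits.add("pages")
--     for lab, _ in _RULES:
--         if lab in hits:
--             return lab
--     return "unknown"
-- ===== Notes on version B (the rewrite author's own statement) =====
-- stated objective: alternative
-- what changed: Replaces A's staged per-category if-chains (which rescan the header list once per category) with a single pass that accumulates the set of category labels hit, minimised token groups (dropping the redundant 'pages'/'devices'/'search appearance' tokens), and a final priority pick over the hit set.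
import Mathlib
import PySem

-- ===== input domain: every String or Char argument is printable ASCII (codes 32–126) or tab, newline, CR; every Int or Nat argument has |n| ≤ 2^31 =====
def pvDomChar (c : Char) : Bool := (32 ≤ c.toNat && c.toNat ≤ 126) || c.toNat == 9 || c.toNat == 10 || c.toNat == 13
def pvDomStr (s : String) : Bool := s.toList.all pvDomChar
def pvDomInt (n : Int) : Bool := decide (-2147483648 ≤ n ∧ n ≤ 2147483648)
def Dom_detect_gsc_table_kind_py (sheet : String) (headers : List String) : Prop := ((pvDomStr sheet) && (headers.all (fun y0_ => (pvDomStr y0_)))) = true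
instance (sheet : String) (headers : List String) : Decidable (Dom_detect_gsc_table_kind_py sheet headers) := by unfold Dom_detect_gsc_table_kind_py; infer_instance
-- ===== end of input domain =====

-- B replaces A's staged per-category if-chains (which rescan the header list once per
-- category) by a single-pass hit-set classifier with minimised token groups and a
-- priority pick (objective: alternative decomposition, same cost).


-- ===== PORT A =====
def detect_gsc_table_kind_py (sheet : String) (headers : List String) : String :=
  -- s = (sheet or "").strip().lower()  ('sheet or ""' is the identity on strings)
  let s := PySem.Str.lower (PySem.Str.strip sheet)
  if PySem.Str.isIn "query" s || PySem.Str.isIn "queries" s then "queries"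
  else if PySem.Str.isIn "page" s || PySem.Str.isIn "pages" s then "pages"
  else if PySem.Str.isIn "country" s || PySem.Str.isIn "countries" s then "countries"
  else if PySem.Str.isIn "device" s || PySem.Str.isIn "devices" s then "devices"
  else if PySem.Str.isIn "search appearance" s || PySem.Str.isIn "appearance" s then "search_appearance"
  else if PySem.Str.isIn "date" s || PySem.Str.isIn "chart" s || PySem.Str.isIn "performance" s then "chart"
  else
    -- hs = [str(h or "").strip().lower() for h in (headers or [])]
    let hs := headers.map (fun h => PySem.Str.lower (PySem.Str.strip h))
    if hs.any (fun h => PySem.Str.isIn "query" h || PySem.Str.isIn "queries" h) then "queries"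
    else if hs.any (fun h => PySem.Str.isIn "page" h || PySem.Str.isIn "pages" h || "url" == h) then "pages"
    else if hs.any (fun h => PySem.Str.isIn "country" h || PySem.Str.isIn "countries" h) then "countries"
    else if hs.any (fun h => PySem.Str.isIn "device" h || PySem.Str.isIn "devices" h) then "devices"
    else if hs.any (fun h => PySem.Str.isIn "appearance" h) then "search_appearance"
    else "unknown"

-- ===== PORT B =====
-- _RULES: priority-ordered (label, minimised token group)
def pvRules : List (String × List String) :=
  [("queries", ["query", "queries"]),
   ("pages", ["page"]),
   ("countries", ["country", "countries"]),
   ("devices", ["device"]),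
   ("search_appearance", ["appearance"])]

-- _hits(text) = {lab for lab, toks in _RULES if any(t in text for t in toks)}
def pvHits (text : String) : PySem.Set String :=
  PySem.Set.ofList ((pvRules.filter (fun r => r.2.any (fun t => PySem.Str.isIn t text))).map (·.1))

-- loop body: h = str(h or "").strip().lower(); hits |= _hits(h); if h == "url": hits.add("pages")
def pvStep (acc : PySem.Set String) (h : String) : PySem.Set String :=
  let h' := PySem.Str.lower (PySem.Str.strip h)
  let acc' := PySem.Set.union acc (pvHits h')
  if h' == "url" then PySem.Set.add acc' "pages" else acc'

-- final priority loop: 'for lab, _ in _RULES: if lab in hits: return lab; return "unknown"'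
def pvPick (hits : PySem.Set String) : String :=
  ((pvRules.find? (fun r => PySem.Set.contains hits r.1)).map (·.1)).getD "unknown"

def detect_gsc_table_kind_py_alt (sheet : String) (headers : List String) : String :=
  let s := PySem.Str.lower (PySem.Str.strip sheet)
  let hits := pvHits s
  if hits.isEmpty then
    if PySem.Str.isIn "date" s || PySem.Str.isIn "chart" s || PySem.Str.isIn "performance" s then "chart"
    else pvPick (headers.foldl pvStep hits)   -- one pass over the headers
  else pvPick hits

-- ===== PRECONDITION & SPEC =====
def Spec_detect_gsc_table_kind_py (sheet : String) (headers : List String) (out : String) : Prop := out = detect_gsc_table_kind_py_alt sheet headers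
instance (sheet : String) (headers : List String) (out : String) : Decidable (Spec_detect_gsc_table_kind_py sheet headers out) := by unfold Spec_detect_gsc_table_kind_py; infer_instance

-- ===== CLAIM (what is proved, stated in full; the proofs are below) =====
def Claim_equal_detect_gsc_table_kind_py : Prop := ∀ (sheet : String) (headers : List String), Dom_detect_gsc_table_kind_py sheet headers → Spec_detect_gsc_table_kind_py sheet headers (detect_gsc_table_kind_py sheet headers)

-- ===== LEMMAS AND PROOFS =====

-- a substring of a substring is a substring ('pages' in s → 'page' in s, …)
theorem pv_isIn_mono {sub1 sub2 s : String} (h : sub1.toList <:+: sub2.toList)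
    (h2 : PySem.Str.isIn sub2 s = true) : PySem.Str.isIn sub1 s = true := by
  rw [PySem.Str.isIn_iff_infix] at h2 ⊢
  exact h.trans h2

-- a || b = a when b → a (collapses A's redundant tokens 'pages', 'devices')
theorem pv_or_absorb {a b : Bool} (h : b = true → a = true) : (a || b) = a := by
  cases a <;> cases b <;> simp_all

-- a || b = b when a → b (collapses A's redundant token 'search appearance')
theorem pv_or_absorb_left {a b : Bool} (h : a = true → b = true) : (a || b) = b := by
  cases a <;> cases b <;> simp_all

theorem pv_pages_collapse (s : String) :
    (PySem.Str.isIn "page" s || PySem.Str.isIn "pages" s) = PySem.Str.isIn "page" s :=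
  pv_or_absorb (pv_isIn_mono (by decide))

theorem pv_devices_collapse (s : String) :
    (PySem.Str.isIn "device" s || PySem.Str.isIn "devices" s) = PySem.Str.isIn "device" s :=
  pv_or_absorb (pv_isIn_mono (by decide))

theorem pv_sa_collapse (s : String) :
    (PySem.Str.isIn "search appearance" s || PySem.Str.isIn "appearance" s) = PySem.Str.isIn "appearance" s :=
  pv_or_absorb_left (pv_isIn_mono (by decide))

-- membership characterisation of _hits, one lemma per label
theorem pv_mem_hits_q (t : String) : "queries" ∈ pvHits t ↔ (PySem.Str.isIn "query" t || PySem.Str.isIn "queries" t) = true := by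
  unfold pvHits pvRules
  rw [PySem.Set.mem_ofList]
  simp only [List.mem_map, List.mem_filter, List.mem_cons, List.not_mem_nil, or_false]
  constructor
  · rintro ⟨a, ⟨ha, hp⟩, he⟩
    rcases ha with rfl | rfl | rfl | rfl | rfl
    · simpa using hp
    · exact absurd he (by decide)
    · exact absurd he (by decide)
    · exact absurd he (by decide)
    · exact absurd he (by decide)
  · intro hcond
    exact ⟨("queries", ["query", "queries"]), ⟨Or.inl rfl, by simpa using hcond⟩, rfl⟩

theorem pv_mem_hits_p (t : String) : "pages" ∈ pvHits t ↔ PySem.Str.isIn "page" t = true := by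
  unfold pvHits pvRules
  rw [PySem.Set.mem_ofList]
  simp only [List.mem_map, List.mem_filter, List.mem_cons, List.not_mem_nil, or_false]
  constructor
  · rintro ⟨a, ⟨ha, hp⟩, he⟩
    rcases ha with rfl | rfl | rfl | rfl | rfl
    · exact absurd he (by decide)
    · simpa using hp
    · exact absurd he (by decide)
    · exact absurd he (by decide)
    · exact absurd he (by decide)
  · intro hcond
    exact ⟨("pages", ["page"]), ⟨Or.inr (Or.inl rfl), by simpa using hcond⟩, rfl⟩

theorem pv_mem_hits_c (t : String) : "countries" ∈ pvHits t ↔ (PySem.Str.isIn "country" t || PySem.Str.isIn "countries" t) = true := by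
  unfold pvHits pvRules
  rw [PySem.Set.mem_ofList]
  simp only [List.mem_map, List.mem_filter, List.mem_cons, List.not_mem_nil, or_false]
  constructor
  · rintro ⟨a, ⟨ha, hp⟩, he⟩
    rcases ha with rfl | rfl | rfl | rfl | rfl
    · exact absurd he (by decide)
    · exact absurd he (by decide)
    · simpa using hp
    · exact absurd he (by decide)
    · exact absurd he (by decide)
  · intro hcond
    exact ⟨("countries", ["country", "countries"]), ⟨Or.inr (Or.inr (Or.inl rfl)), by simpa using hcond⟩, rfl⟩

theorem pv_mem_hits_d (t : String) : "devices" ∈ pvHits t ↔ PySem.Str.isIn "device" t = true := by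
  unfold pvHits pvRules
  rw [PySem.Set.mem_ofList]
  simp only [List.mem_map, List.mem_filter, List.mem_cons, List.not_mem_nil, or_false]
  constructor
  · rintro ⟨a, ⟨ha, hp⟩, he⟩
    rcases ha with rfl | rfl | rfl | rfl | rfl
    · exact absurd he (by decide)
    · exact absurd he (by decide)
    · exact absurd he (by decide)
    · simpa using hp
    · exact absurd he (by decide)
  · intro hcond
    exact ⟨("devices", ["device"]), ⟨Or.inr (Or.inr (Or.inr (Or.inl rfl))), by simpa using hcond⟩, rfl⟩

theorem pv_mem_hits_a (t : String) : "search_appearance" ∈ pvHits t ↔ PySem.Str.isIn "appearance" t = true := by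
  unfold pvHits pvRules
  rw [PySem.Set.mem_ofList]
  simp only [List.mem_map, List.mem_filter, List.mem_cons, List.not_mem_nil, or_false]
  constructor
  · rintro ⟨a, ⟨ha, hp⟩, he⟩
    rcases ha with rfl | rfl | rfl | rfl | rfl
    · exact absurd he (by decide)
    · exact absurd he (by decide)
    · exact absurd he (by decide)
    · exact absurd he (by decide)
    · simpa using hp
  · intro hcond
    exact ⟨("search_appearance", ["appearance"]), ⟨Or.inr (Or.inr (Or.inr (Or.inr rfl))), by simpa using hcond⟩, rfl⟩

theorem pv_contains_hits_q (t : String) : PySem.Set.contains (pvHits t) "queries" = (PySem.Str.isIn "query" t || PySem.Str.isIn "queries" t) := by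
  rw [Bool.eq_iff_iff, PySem.Set.contains_iff]; exact pv_mem_hits_q t

theorem pv_contains_hits_p (t : String) : PySem.Set.contains (pvHits t) "pages" = PySem.Str.isIn "page" t := by
  rw [Bool.eq_iff_iff, PySem.Set.contains_iff]; exact pv_mem_hits_p t

theorem pv_contains_hits_c (t : String) : PySem.Set.contains (pvHits t) "countries" = (PySem.Str.isIn "country" t || PySem.Str.isIn "countries" t) := by
  rw [Bool.eq_iff_iff, PySem.Set.contains_iff]; exact pv_mem_hits_c t

theorem pv_contains_hits_d (t : String) : PySem.Set.contains (pvHits t) "devices" = PySem.Str.isIn "device" t := by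
  rw [Bool.eq_iff_iff, PySem.Set.contains_iff]; exact pv_mem_hits_d t

theorem pv_contains_hits_a (t : String) : PySem.Set.contains (pvHits t) "search_appearance" = PySem.Str.isIn "appearance" t := by
  rw [Bool.eq_iff_iff, PySem.Set.contains_iff]; exact pv_mem_hits_a t

theorem pv_ofList_eq_nil_iff (l : List String) : PySem.Set.ofList l = [] ↔ l = [] := by
  cases l <;> simp [PySem.Set.ofList_nil, PySem.Set.ofList_cons]

-- the hit set of t is empty iff no category token occurs in t
theorem pv_hits_isEmpty (t : String) :
    (pvHits t).isEmpty = (!(PySem.Str.isIn "query" t || PySem.Str.isIn "queries" t) &&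
      !(PySem.Str.isIn "page" t) && !(PySem.Str.isIn "country" t || PySem.Str.isIn "countries" t) &&
      !(PySem.Str.isIn "device" t) && !(PySem.Str.isIn "appearance" t)) := by
  rw [Bool.eq_iff_iff, List.isEmpty_iff]
  rw [pvHits, pv_ofList_eq_nil_iff, List.map_eq_nil_iff, List.filter_eq_nil_iff]
  simp only [pvRules, List.forall_mem_cons, List.any_cons, List.any_nil,
    Bool.or_false, Bool.and_eq_true, Bool.not_eq_true, Bool.not_eq_true',
    Bool.or_eq_false_iff]
  tauto

-- membership in one step of B's header loop
theorem pv_mem_step (acc : PySem.Set String) (h x : String) :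
    x ∈ pvStep acc h ↔ x ∈ acc ∨
      (x ∈ pvHits (PySem.Str.lower (PySem.Str.strip h)) ∨
        (x = "pages" ∧ PySem.Str.lower (PySem.Str.strip h) = "url")) := by
  by_cases hu : PySem.Str.lower (PySem.Str.strip h) = "url"
  · have hc : (PySem.Str.lower (PySem.Str.strip h) == "url") = true := by
      rw [beq_iff_eq]; exact hu
    unfold pvStep
    rw [if_pos hc, PySem.Set.mem_add, PySem.Set.mem_union]
    constructor
    · rintro ((hx | hx) | hx)
      · exact Or.inl hx
      · exact Or.inr (Or.inl hx)
      · exact Or.inr (Or.inr ⟨hx, hu⟩)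
    · rintro (hx | (hx | ⟨hx, -⟩))
      · exact Or.inl (Or.inl hx)
      · exact Or.inl (Or.inr hx)
      · exact Or.inr hx
  · have hc : (PySem.Str.lower (PySem.Str.strip h) == "url") = false := by
      rw [beq_eq_false_iff_ne]; exact hu
    unfold pvStep
    rw [if_neg (by simp [hc]), PySem.Set.mem_union]
    constructor
    · rintro (hx | hx)
      · exact Or.inl hx
      · exact Or.inr (Or.inl hx)
    · rintro (hx | (hx | ⟨-, hx⟩))
      · exact Or.inl hx
      · exact Or.inr hx
      · exact absurd hx hu

-- membership in B's header fold
theorem pv_mem_fold (headers : List String) (x : String) (acc : PySem.Set String) :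
    x ∈ headers.foldl pvStep acc ↔ x ∈ acc ∨ ∃ h ∈ headers,
      x ∈ pvHits (PySem.Str.lower (PySem.Str.strip h)) ∨
        (x = "pages" ∧ PySem.Str.lower (PySem.Str.strip h) = "url") := by
  induction headers generalizing acc with
  | nil => simp
  | cons h t ih =>
      rw [List.foldl_cons, ih, pv_mem_step]
      constructor
      · rintro ((hx | hx) | ⟨h', hh', hx⟩)
        · exact Or.inl hx
        · exact Or.inr ⟨h, List.mem_cons_self, hx⟩
        · exact Or.inr ⟨h', List.mem_cons_of_mem _ hh', hx⟩
      · rintro (hx | ⟨h', hh', hx⟩)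
        · exact Or.inl (Or.inl hx)
        · rcases List.mem_cons.mp hh' with rfl | hmem
          · exact Or.inl (Or.inr hx)
          · exact Or.inr ⟨h', hmem, hx⟩

-- contains after the fold = contains before || some header matched, one lemma per label
theorem pv_contains_fold_q (headers : List String) (acc : PySem.Set String) :
    PySem.Set.contains (headers.foldl pvStep acc) "queries" =
      (PySem.Set.contains acc "queries" ||
        (headers.map (fun h => PySem.Str.lower (PySem.Str.strip h))).any
          (fun h => PySem.Str.isIn "query" h || PySem.Str.isIn "queries" h)) := by
  rw [Bool.eq_iff_iff, PySem.Set.contains_iff, pv_mem_fold, List.any_map]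
  simp only [Bool.or_eq_true, PySem.Set.contains_iff, List.any_eq_true, Function.comp,
    pv_mem_hits_q]
  constructor
  · rintro (hx | ⟨h, hh, hx | ⟨hbad, -⟩⟩)
    · exact Or.inl hx
    · exact Or.inr ⟨h, hh, hx⟩
    · exact absurd hbad (by decide)
  · rintro (hx | ⟨h, hh, hx⟩)
    · exact Or.inl hx
    · exact Or.inr ⟨h, hh, Or.inl hx⟩

theorem pv_contains_fold_p (headers : List String) (acc : PySem.Set String) :
    PySem.Set.contains (headers.foldl pvStep acc) "pages" =
      (PySem.Set.contains acc "pages" ||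
        (headers.map (fun h => PySem.Str.lower (PySem.Str.strip h))).any
          (fun h => PySem.Str.isIn "page" h || "url" == h)) := by
  rw [Bool.eq_iff_iff, PySem.Set.contains_iff, pv_mem_fold, List.any_map]
  simp only [Bool.or_eq_true, PySem.Set.contains_iff, List.any_eq_true, Function.comp,
    pv_mem_hits_p, beq_iff_eq]
  constructor
  · rintro (hx | ⟨h, hh, hx | ⟨-, hu⟩⟩)
    · exact Or.inl hx
    · exact Or.inr ⟨h, hh, Or.inl hx⟩
    · exact Or.inr ⟨h, hh, Or.inr hu.symm⟩
  · rintro (hx | ⟨h, hh, hx | hu⟩)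
    · exact Or.inl hx
    · exact Or.inr ⟨h, hh, Or.inl hx⟩
    · exact Or.inr ⟨h, hh, Or.inr ⟨trivial, hu.symm⟩⟩

theorem pv_contains_fold_c (headers : List String) (acc : PySem.Set String) :
    PySem.Set.contains (headers.foldl pvStep acc) "countries" =
      (PySem.Set.contains acc "countries" ||
        (headers.map (fun h => PySem.Str.lower (PySem.Str.strip h))).any
          (fun h => PySem.Str.isIn "country" h || PySem.Str.isIn "countries" h)) := by
  rw [Bool.eq_iff_iff, PySem.Set.contains_iff, pv_mem_fold, List.any_map]
  simp only [Bool.or_eq_true, PySem.Set.contains_iff, List.any_eq_true, Function.comp,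
    pv_mem_hits_c]
  constructor
  · rintro (hx | ⟨h, hh, hx | ⟨hbad, -⟩⟩)
    · exact Or.inl hx
    · exact Or.inr ⟨h, hh, hx⟩
    · exact absurd hbad (by decide)
  · rintro (hx | ⟨h, hh, hx⟩)
    · exact Or.inl hx
    · exact Or.inr ⟨h, hh, Or.inl hx⟩

theorem pv_contains_fold_d (headers : List String) (acc : PySem.Set String) :
    PySem.Set.contains (headers.foldl pvStep acc) "devices" =
      (PySem.Set.contains acc "devices" ||
        (headers.map (fun h => PySem.Str.lower (PySem.Str.strip h))).any
          (fun h => PySem.Str.isIn "device" h)) := by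
  rw [Bool.eq_iff_iff, PySem.Set.contains_iff, pv_mem_fold, List.any_map]
  simp only [Bool.or_eq_true, PySem.Set.contains_iff, List.any_eq_true, Function.comp,
    pv_mem_hits_d]
  constructor
  · rintro (hx | ⟨h, hh, hx | ⟨hbad, -⟩⟩)
    · exact Or.inl hx
    · exact Or.inr ⟨h, hh, hx⟩
    · exact absurd hbad (by decide)
  · rintro (hx | ⟨h, hh, hx⟩)
    · exact Or.inl hx
    · exact Or.inr ⟨h, hh, Or.inl hx⟩

theorem pv_contains_fold_a (headers : List String) (acc : PySem.Set String) :
    PySem.Set.contains (headers.foldl pvStep acc) "search_appearance" =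
      (PySem.Set.contains acc "search_appearance" ||
        (headers.map (fun h => PySem.Str.lower (PySem.Str.strip h))).any
          (fun h => PySem.Str.isIn "appearance" h)) := by
  rw [Bool.eq_iff_iff, PySem.Set.contains_iff, pv_mem_fold, List.any_map]
  simp only [Bool.or_eq_true, PySem.Set.contains_iff, List.any_eq_true, Function.comp,
    pv_mem_hits_a]
  constructor
  · rintro (hx | ⟨h, hh, hx | ⟨hbad, -⟩⟩)
    · exact Or.inl hx
    · exact Or.inr ⟨h, hh, hx⟩
    · exact absurd hbad (by decide)
  · rintro (hx | ⟨h, hh, hx⟩)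
    · exact Or.inl hx
    · exact Or.inr ⟨h, hh, Or.inl hx⟩

-- the priority loop as an if-chain over the five memberships
theorem pv_pick_eq (hits : PySem.Set String) :
    pvPick hits =
      if PySem.Set.contains hits "queries" then "queries"
      else if PySem.Set.contains hits "pages" then "pages"
      else if PySem.Set.contains hits "countries" then "countries"
      else if PySem.Set.contains hits "devices" then "devices"
      else if PySem.Set.contains hits "search_appearance" then "search_appearance"
      else "unknown" := by
  cases hq : PySem.Set.contains hits "queries" <;>
    cases hp : PySem.Set.contains hits "pages" <;>
      cases hc : PySem.Set.contains hits "countries" <;>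
        cases hd : PySem.Set.contains hits "devices" <;>
          cases ha : PySem.Set.contains hits "search_appearance" <;>
            simp only [pvPick, pvRules, List.find?, hq, hp, hc, hd, ha, Option.map_some,
              Option.map_none, Option.getD_some, Option.getD_none, Bool.false_eq_true,
              if_true, if_false]

-- both programs as the same if-chain over eleven shared Bool atoms
theorem pv_canon (b1 b2 b3 b4 b5 bc d1 d2 d3 d4 d5 : Bool) :
    (if b1 then "queries"
     else if b2 then "pages"
     else if b3 then "countries"
     else if b4 then "devices"
     else if b5 then "search_appearance"
     else if bc then "chart"
     else if d1 then "queries"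
     else if d2 then "pages"
     else if d3 then "countries"
     else if d4 then "devices"
     else if d5 then "search_appearance"
     else "unknown") =
    (if (!b1 && !b2 && !b3 && !b4 && !b5) then
       (if bc then "chart"
        else if (b1 || d1) then "queries"
        else if (b2 || d2) then "pages"
        else if (b3 || d3) then "countries"
        else if (b4 || d4) then "devices"
        else if (b5 || d5) then "search_appearance"
        else "unknown")
     else if b1 then "queries"
     else if b2 then "pages"
     else if b3 then "countries"
     else if b4 then "devices"
     else if b5 then "search_appearance"
     else "unknown") := by
  cases b1 <;> cases b2 <;> cases b3 <;> cases b4 <;> cases b5 <;> simp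

-- ===== VERDICT (by name: the statement is the Claim_ definition above) =====
theorem detect_gsc_table_kind_py_spec : Claim_equal_detect_gsc_table_kind_py := by
  intro sheet headers _
  unfold Spec_detect_gsc_table_kind_py detect_gsc_table_kind_py detect_gsc_table_kind_py_alt
  simp only [pv_pages_collapse, pv_devices_collapse, pv_sa_collapse, pv_hits_isEmpty,
    pv_pick_eq, pv_contains_fold_q, pv_contains_fold_p, pv_contains_fold_c,
    pv_contains_fold_d, pv_contains_fold_a, pv_contains_hits_q, pv_contains_hits_p,
    pv_contains_hits_c, pv_contains_hits_d, pv_contains_hits_a]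
  exact pv_canon _ _ _ _ _ _ _ _ _ _ _
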